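-- pv_equiv track=rewrite | github.com/luoingly/advent-of-code | 2025/day12/part1.py | gen_transforms
-- ===== SOURCE A (Python) =====
-- def gen_transforms(coords: list[tuple[int, int]]):
--     result: set[tuple[tuple[int, int], ...]] = set()
--
--     def normalize(coords: list[tuple[int, int]]):
--         minr = min(r for r, _ in coords)
--         minc = min(c for _, c in coords)
--         norm = tuple(sorted(((r - minr, c - minc) for r, c in coords)))
--         return norm
--
--     for reflect in (False, True):
--         for rot in range(4):
--             out = []
--             for r, c in coords:
--                 c2 = -c if reflect else c
--                 rr, cc = r, c2
--                 for _ in range(rot):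
--                     rr, cc = cc, -rr
--                 out.append((rr, cc))
--             result.add(normalize(out))
--     return result
-- ===== SOURCE B (Python) =====
-- def gen_transforms(coords: list[tuple[int, int]]):
--     # Normalize once; then each of the 8 symmetries of the bounding box has a
--     # direct non-negative closed form using height h and width w, so no
--     # per-symmetry re-normalization (min subtraction) is needed.
--     minr = min(r for r, _ in coords)
--     minc = min(c for _, c in coords)
--     maxr = max(r for r, _ in coords)
--     maxc = max(c for _, c in coords)
--     h = maxr - minr
--     w = maxc - minc
--     base = [(r - minr, c - minc) for r, c in coords]
--     forms = [
--         lambda r, c: (r, c),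
--         lambda r, c: (c, h - r),
--         lambda r, c: (h - r, w - c),
--         lambda r, c: (w - c, r),
--         lambda r, c: (r, w - c),
--         lambda r, c: (w - c, h - r),
--         lambda r, c: (h - r, c),
--         lambda r, c: (c, r),
--     ]
--     result: set[tuple[tuple[int, int], ...]] = set()
--     for f in forms:
--         result.add(tuple(sorted(f(r, c) for r, c in base)))
--     return result
-- ===== Notes on version B (the rewrite author's own statement) =====
-- stated objective: alternative
-- what changed: Instead of transforming raw coordinates per symmetry and re-normalizing each of the 8 images with fresh min() scans, B normalizes the input once, computes the bounding box (h,w), and writes each normalized symmetry directly as a closed-form non-negative formula over the pre-shifted points, so the incremental rotation loops and all per-symmetry min computations disappear.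
import Mathlib
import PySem

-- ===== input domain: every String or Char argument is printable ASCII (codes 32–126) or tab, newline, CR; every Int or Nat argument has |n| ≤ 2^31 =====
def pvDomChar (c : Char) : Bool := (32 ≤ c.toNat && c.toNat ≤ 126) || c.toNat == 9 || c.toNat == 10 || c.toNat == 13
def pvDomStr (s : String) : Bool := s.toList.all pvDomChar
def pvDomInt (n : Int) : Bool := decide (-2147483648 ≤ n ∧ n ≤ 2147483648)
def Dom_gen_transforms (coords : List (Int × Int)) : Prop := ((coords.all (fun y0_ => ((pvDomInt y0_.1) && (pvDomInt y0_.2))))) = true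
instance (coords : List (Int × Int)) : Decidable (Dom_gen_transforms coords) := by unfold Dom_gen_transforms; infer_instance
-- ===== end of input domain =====

-- B normalizes once and writes each of the 8 symmetries as a closed-form non-negative
-- formula over the bounding box, removing A's incremental rotations and per-symmetry min scans.

-- ===== PORT A =====
-- A's inner `normalize`: subtract per-axis minimum, sort lexicographically.
-- (the `[]` branch is unreachable under Pre_: normalize is only applied to nonempty lists)
def pyNormA (cs : List (Int × Int)) : List (Int × Int) :=
  match PySem.List.min? (cs.map Prod.fst) (fun x => x), PySem.List.min? (cs.map Prod.snd) (fun x => x) with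
  | some minr, some minc =>
      PySem.List.sorted2 (cs.map (fun p => (p.1 - minr, p.2 - minc))) Prod.fst Prod.snd
  | _, _ => []

def gen_transforms (coords : List (Int × Int)) : List (List (Int × Int)) :=
  [false, true].foldl (fun result reflect =>
    (PySem.List.pyRange 0 4 1).foldl (fun result rot =>
      let out := coords.foldl (fun out p =>
        let c2 : Int := if reflect then -p.2 else p.2
        let rc := (PySem.List.pyRange 0 rot 1).foldl
          (fun (rc : Int × Int) _ => (rc.2, -rc.1)) (p.1, c2)
        out ++ [rc]) ([] : List (Int × Int))
      PySem.Set.add result (pyNormA out)) result)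
    PySem.Set.empty

-- ===== PORT B =====
-- the `[]` branch mirrors Source B's min()/max() raising on empty input (excluded by Pre_)
def gen_transforms_alt (coords : List (Int × Int)) : List (List (Int × Int)) :=
  match PySem.List.min? (coords.map Prod.fst) (fun x => x),
        PySem.List.min? (coords.map Prod.snd) (fun x => x),
        PySem.List.max? (coords.map Prod.fst) (fun x => x),
        PySem.List.max? (coords.map Prod.snd) (fun x => x) with
  | some minr, some minc, some maxr, some maxc =>
      let h := maxr - minr
      let w := maxc - minc
      let base := coords.map (fun p => (p.1 - minr, p.2 - minc))
      let forms : List ((Int × Int) → (Int × Int)) :=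
        [ fun p => (p.1, p.2),
          fun p => (p.2, h - p.1),
          fun p => (h - p.1, w - p.2),
          fun p => (w - p.2, p.1),
          fun p => (p.1, w - p.2),
          fun p => (w - p.2, h - p.1),
          fun p => (h - p.1, p.2),
          fun p => (p.2, p.1) ]
      forms.foldl (fun result f =>
        PySem.Set.add result (PySem.List.sorted2 (base.map f) Prod.fst Prod.snd))
        PySem.Set.empty
  | _, _, _, _ => []

-- ===== PRECONDITION & SPEC =====
-- Pre_ excludes the empty list, on which A's `min` raises ValueError (B's min/max raise too).
def Pre_gen_transforms (coords : List (Int × Int)) : Prop := coords ≠ []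
instance (coords : List (Int × Int)) : Decidable (Pre_gen_transforms coords) := by
  unfold Pre_gen_transforms; infer_instance
def pvWitness_gen_transforms : (List (Int × Int)) := [(0, 0), (1, 2)]
def Spec_gen_transforms (coords : List (Int × Int)) (out : List (List (Int × Int))) : Prop := out = gen_transforms_alt coords
instance (coords : List (Int × Int)) (out : List (List (Int × Int))) : Decidable (Spec_gen_transforms coords out) := by unfold Spec_gen_transforms; infer_instance

-- ===== CLAIM (what is proved, stated in full; the proofs are below) =====
def Claim_equal_gen_transforms : Prop := ∀ (coords : List (Int × Int)), Dom_gen_transforms coords → Pre_gen_transforms coords → Spec_gen_transforms coords (gen_transforms coords)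

-- ===== LEMMAS AND PROOFS =====

theorem min?_map_neg (xs : List Int) :
    PySem.List.min? (xs.map (fun x => -x)) (fun x => x)
      = (PySem.List.max? xs (fun x => x)).map (fun m => -m) := by
  cases xs with
  | nil => rfl
  | cons x t =>
    simp only [List.map_cons, PySem.List.min?_id_cons, PySem.List.max?_id_cons, Option.map_some]
    congr 1
    induction t generalizing x with
    | nil => rfl
    | cons y t ih => simp only [List.map_cons, List.foldl_cons, ← ih, min_neg_neg]

theorem pyNormA_comp (cs : List (Int × Int)) (f g : (Int × Int) → Int) (a b : Int)
    (ha : PySem.List.min? (cs.map f) (fun x => x) = some a)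
    (hb : PySem.List.min? (cs.map g) (fun x => x) = some b) :
    pyNormA (cs.map (fun p => (f p, g p)))
      = PySem.List.sorted2 (cs.map (fun p => (f p - a, g p - b))) Prod.fst Prod.snd := by
  unfold pyNormA
  simp only [List.map_map]
  have h1 : (Prod.fst ∘ fun p => (f p, g p)) = f := rfl
  have h2 : (Prod.snd ∘ fun p => (f p, g p)) = g := rfl
  rw [h1, h2, ha, hb]
  rfl

-- ===== VERDICT (by name: the statement is the Claim_ definition above) =====
set_option maxHeartbeats 2000000 in
theorem gen_transforms_spec : Claim_equal_gen_transforms := by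
  intro coords _ hne
  unfold Spec_gen_transforms
  obtain ⟨x, t, rfl⟩ := List.exists_cons_of_ne_nil hne
  have hf : PySem.List.min? ((x :: t).map Prod.fst) (fun v => v)
      = some ((t.map Prod.fst).foldl min x.1) := by
    simp [PySem.List.min?_id_cons]
  have hs : PySem.List.min? ((x :: t).map Prod.snd) (fun v => v)
      = some ((t.map Prod.snd).foldl min x.2) := by
    simp [PySem.List.min?_id_cons]
  have hXf : PySem.List.max? ((x :: t).map Prod.fst) (fun v => v)
      = some ((t.map Prod.fst).foldl max x.1) := by
    simp [PySem.List.max?_id_cons]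
  have hXs : PySem.List.max? ((x :: t).map Prod.snd) (fun v => v)
      = some ((t.map Prod.snd).foldl max x.2) := by
    simp [PySem.List.max?_id_cons]
  have hnf : PySem.List.min? ((x :: t).map (fun p => -p.1)) (fun v => v)
      = some (-((t.map Prod.fst).foldl max x.1)) := by
    have h : (x :: t).map (fun p : Int × Int => -p.1)
        = ((x :: t).map Prod.fst).map (fun v => -v) := by simp
    rw [h, min?_map_neg, hXf]; rfl
  have hns : PySem.List.min? ((x :: t).map (fun p => -p.2)) (fun v => v)
      = some (-((t.map Prod.snd).foldl max x.2)) := by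
    have h : (x :: t).map (fun p : Int × Int => -p.2)
        = ((x :: t).map Prod.snd).map (fun v => -v) := by simp
    rw [h, min?_map_neg, hXs]; rfl
  unfold gen_transforms_alt
  rw [hf, hs, hXf, hXs]
  unfold gen_transforms
  have h4 : PySem.List.pyRange 0 4 1 = [0, 1, 2, 3] := by decide
  have hr0 : PySem.List.pyRange 0 0 1 = [] := by decide
  have hr1 : PySem.List.pyRange 0 1 1 = [0] := by decide
  have hr2 : PySem.List.pyRange 0 2 1 = [0, 1] := by decide
  have hr3 : PySem.List.pyRange 0 3 1 = [0, 1, 2] := by decide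
  rw [h4]
  simp only [List.foldl_cons, List.foldl_nil, hr0, hr1, hr2, hr3,
    PySem.List.foldl_append_singleton_eq_map, List.nil_append,
    if_true, Bool.false_eq_true, if_false, neg_neg]
  have hc : ∀ (f : (Int × Int) → (Int × Int)), [f x] ++ List.map f t = List.map f (x :: t) := fun f => rfl
  rw [hc (fun p => (p.1, p.2))]
  rw [hc (fun p => (p.2, -p.1))]
  rw [hc (fun p => (-p.1, -p.2))]
  rw [hc (fun p => (-p.2, p.1))]
  rw [hc (fun p => (p.1, -p.2))]
  rw [hc (fun p => (-p.2, -p.1))]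
  rw [hc (fun p => (-p.1, p.2))]
  rw [hc (fun p => (p.2, p.1))]
  -- rewrite the eight A-side normalizations
  rw [pyNormA_comp (x :: t) (fun p => p.1) (fun p => p.2) (((t.map Prod.fst).foldl min x.1)) (((t.map Prod.snd).foldl min x.2)) hf hs]
  rw [pyNormA_comp (x :: t) (fun p => p.2) (fun p => -p.1) (((t.map Prod.snd).foldl min x.2)) (-((t.map Prod.fst).foldl max x.1)) hs hnf]
  rw [pyNormA_comp (x :: t) (fun p => -p.1) (fun p => -p.2) (-((t.map Prod.fst).foldl max x.1)) (-((t.map Prod.snd).foldl max x.2)) hnf hns]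
  rw [pyNormA_comp (x :: t) (fun p => -p.2) (fun p => p.1) (-((t.map Prod.snd).foldl max x.2)) (((t.map Prod.fst).foldl min x.1)) hns hf]
  rw [pyNormA_comp (x :: t) (fun p => p.1) (fun p => -p.2) (((t.map Prod.fst).foldl min x.1)) (-((t.map Prod.snd).foldl max x.2)) hf hns]
  rw [pyNormA_comp (x :: t) (fun p => -p.2) (fun p => -p.1) (-((t.map Prod.snd).foldl max x.2)) (-((t.map Prod.fst).foldl max x.1)) hns hnf]
  rw [pyNormA_comp (x :: t) (fun p => -p.1) (fun p => p.2) (-((t.map Prod.fst).foldl max x.1)) (((t.map Prod.snd).foldl min x.2)) hnf hs]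
  rw [pyNormA_comp (x :: t) (fun p => p.2) (fun p => p.1) (((t.map Prod.snd).foldl min x.2)) (((t.map Prod.fst).foldl min x.1)) hs hf]
  -- the eight per-symmetry lists coincide
  have e2 : (x :: t).map (fun p => ((fun p => p.2) p - (((t.map Prod.snd).foldl min x.2)), (fun p => -p.1) p - (-((t.map Prod.fst).foldl max x.1))))
      = ((x :: t).map (fun p => (p.1 - ((t.map Prod.fst).foldl min x.1), p.2 - ((t.map Prod.snd).foldl min x.2)))).map
          (fun q => (q.2, ((t.map Prod.fst).foldl max x.1) - ((t.map Prod.fst).foldl min x.1) - q.1)) := by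
    simp only [List.map_map]
    apply List.map_congr_left; intro p _
    simp only [Function.comp, Prod.mk.injEq]
    all_goals constructor <;> first | trivial | omega
  have e3 : (x :: t).map (fun p => ((fun p => -p.1) p - (-((t.map Prod.fst).foldl max x.1)), (fun p => -p.2) p - (-((t.map Prod.snd).foldl max x.2))))
      = ((x :: t).map (fun p => (p.1 - ((t.map Prod.fst).foldl min x.1), p.2 - ((t.map Prod.snd).foldl min x.2)))).map
          (fun q => (((t.map Prod.fst).foldl max x.1) - ((t.map Prod.fst).foldl min x.1) - q.1, ((t.map Prod.snd).foldl max x.2) - ((t.map Prod.snd).foldl min x.2) - q.2)) := by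
    simp only [List.map_map]
    apply List.map_congr_left; intro p _
    simp only [Function.comp, Prod.mk.injEq]
    all_goals constructor <;> first | trivial | omega
  have e4 : (x :: t).map (fun p => ((fun p => -p.2) p - (-((t.map Prod.snd).foldl max x.2)), (fun p => p.1) p - (((t.map Prod.fst).foldl min x.1))))
      = ((x :: t).map (fun p => (p.1 - ((t.map Prod.fst).foldl min x.1), p.2 - ((t.map Prod.snd).foldl min x.2)))).map
          (fun q => (((t.map Prod.snd).foldl max x.2) - ((t.map Prod.snd).foldl min x.2) - q.2, q.1)) := by
    simp only [List.map_map]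
    apply List.map_congr_left; intro p _
    simp only [Function.comp, Prod.mk.injEq]
    all_goals constructor <;> first | trivial | omega
  have e5 : (x :: t).map (fun p => ((fun p => p.1) p - (((t.map Prod.fst).foldl min x.1)), (fun p => -p.2) p - (-((t.map Prod.snd).foldl max x.2))))
      = ((x :: t).map (fun p => (p.1 - ((t.map Prod.fst).foldl min x.1), p.2 - ((t.map Prod.snd).foldl min x.2)))).map
          (fun q => (q.1, ((t.map Prod.snd).foldl max x.2) - ((t.map Prod.snd).foldl min x.2) - q.2)) := by
    simp only [List.map_map]
    apply List.map_congr_left; intro p _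
    simp only [Function.comp, Prod.mk.injEq]
    all_goals constructor <;> first | trivial | omega
  have e6 : (x :: t).map (fun p => ((fun p => -p.2) p - (-((t.map Prod.snd).foldl max x.2)), (fun p => -p.1) p - (-((t.map Prod.fst).foldl max x.1))))
      = ((x :: t).map (fun p => (p.1 - ((t.map Prod.fst).foldl min x.1), p.2 - ((t.map Prod.snd).foldl min x.2)))).map
          (fun q => (((t.map Prod.snd).foldl max x.2) - ((t.map Prod.snd).foldl min x.2) - q.2, ((t.map Prod.fst).foldl max x.1) - ((t.map Prod.fst).foldl min x.1) - q.1)) := by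
    simp only [List.map_map]
    apply List.map_congr_left; intro p _
    simp only [Function.comp, Prod.mk.injEq]
    all_goals constructor <;> first | trivial | omega
  have e7 : (x :: t).map (fun p => ((fun p => -p.1) p - (-((t.map Prod.fst).foldl max x.1)), (fun p => p.2) p - (((t.map Prod.snd).foldl min x.2))))
      = ((x :: t).map (fun p => (p.1 - ((t.map Prod.fst).foldl min x.1), p.2 - ((t.map Prod.snd).foldl min x.2)))).map
          (fun q => (((t.map Prod.fst).foldl max x.1) - ((t.map Prod.fst).foldl min x.1) - q.1, q.2)) := by
    simp only [List.map_map]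
    apply List.map_congr_left; intro p _
    simp only [Function.comp, Prod.mk.injEq]
    all_goals constructor <;> first | trivial | omega
  have e8 : (x :: t).map (fun p => ((fun p => p.2) p - (((t.map Prod.snd).foldl min x.2)), (fun p => p.1) p - (((t.map Prod.fst).foldl min x.1))))
      = ((x :: t).map (fun p => (p.1 - ((t.map Prod.fst).foldl min x.1), p.2 - ((t.map Prod.snd).foldl min x.2)))).map
          (fun q => (q.2, q.1)) := by
    simp only [List.map_map]
    apply List.map_congr_left; intro p _
    simp only [Function.comp]
  rw [e2]
  rw [e3]
  rw [e4]
  rw [e5]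
  rw [e6]
  rw [e7]
  rw [e8]
  have hid : List.map (fun q : Int × Int => (q.1, q.2))
      (List.map (fun p : Int × Int => (p.1 - ((t.map Prod.fst).foldl min x.1), p.2 - ((t.map Prod.snd).foldl min x.2))) (x :: t))
      = List.map (fun p : Int × Int => (p.1 - ((t.map Prod.fst).foldl min x.1), p.2 - ((t.map Prod.snd).foldl min x.2))) (x :: t) := by
    simp
  rw [hid]
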